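-- pv_equiv track=rewrite | github.com/paulklemstine/factor | ec_formal_diffeq_experiment.py | poly_mul_trunc
-- ===== SOURCE A (Python) =====
-- def poly_mul_trunc(a, b, n):
--     """Multiply two polynomial coefficient lists, truncate to degree n."""
--     result = [0] * (n + 1)
--     for i in range(min(len(a), n + 1)):
--         if a[i] == 0:
--             continue
--         for j in range(min(len(b), n + 1 - i)):
--             result[i + j] += a[i] * b[j]
--     return result
-- ===== SOURCE B (Python) =====
-- def poly_mul_trunc(a, b, n):
--     """Multiply two polynomial coefficient lists, truncate to degree n."""
--     la, lb = len(a), len(b)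
--     return [sum(a[i] * b[k - i] for i in range(max(0, k - lb + 1), min(k + 1, la)))
--             for k in range(n + 1)]
-- ===== Notes on version B (the rewrite author's own statement) =====
-- stated objective: alternative
-- what changed: B builds the result as an output-indexed comprehension, computing each coefficient k directly as the convolution sum over the exact index window max(0,k-len(b)+1)..min(k,len(a)-1), instead of A's input-indexed nested loops accumulating into a preallocated mutable result list with a zero-coefficient skip.
import Mathlib
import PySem

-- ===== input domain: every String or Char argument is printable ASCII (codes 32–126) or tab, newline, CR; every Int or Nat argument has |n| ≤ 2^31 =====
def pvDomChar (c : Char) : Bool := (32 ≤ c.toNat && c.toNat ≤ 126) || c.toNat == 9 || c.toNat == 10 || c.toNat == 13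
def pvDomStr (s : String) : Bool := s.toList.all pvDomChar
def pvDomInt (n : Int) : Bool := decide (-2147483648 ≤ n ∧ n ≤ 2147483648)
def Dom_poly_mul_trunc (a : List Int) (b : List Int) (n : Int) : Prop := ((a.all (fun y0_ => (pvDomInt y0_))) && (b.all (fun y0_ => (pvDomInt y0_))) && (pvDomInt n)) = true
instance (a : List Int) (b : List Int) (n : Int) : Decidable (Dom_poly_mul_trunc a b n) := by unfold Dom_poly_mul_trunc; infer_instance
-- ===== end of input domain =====

-- B computes each output coefficient directly as a convolution sum (output-indexed, no mutable
-- accumulator), instead of A's input-indexed nested accumulation loops; alternative decomposition, same cost.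

-- ===== PORT A =====
-- literal transliteration of A; every index used is nonnegative and in range, so pyGetD/pySetD are exact
def poly_mul_trunc (a : List Int) (b : List Int) (n : Int) : List Int :=
  let result : List Int := List.replicate (n + 1).toNat 0   -- [0] * (n + 1); Python gives [] for a negative count
  (PySem.List.pyRange 0 (min (PySem.List.len a) (n + 1)) 1).foldl
    (fun result i =>
      if PySem.List.pyGetD a i 0 == 0 then result           -- 'continue'
      else
        (PySem.List.pyRange 0 (min (PySem.List.len b) (n + 1 - i)) 1).foldl
          (fun result j =>
            PySem.List.pySetD result (i + j)
              (PySem.List.pyGetD result (i + j) 0 + PySem.List.pyGetD a i 0 * PySem.List.pyGetD b j 0))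
          result)
    result

-- ===== PORT B =====
def poly_mul_trunc_alt (a : List Int) (b : List Int) (n : Int) : List Int :=
  (PySem.List.pyRange 0 (n + 1) 1).map (fun k =>
    (PySem.List.pyRange (max 0 (k - PySem.List.len b + 1)) (min (k + 1) (PySem.List.len a)) 1).foldl
      (fun s i => s + PySem.List.pyGetD a i 0 * PySem.List.pyGetD b (k - i) 0)
      0)

-- ===== PRECONDITION & SPEC =====
def Spec_poly_mul_trunc (a : List Int) (b : List Int) (n : Int) (out : List Int) : Prop := out = poly_mul_trunc_alt a b n
instance (a : List Int) (b : List Int) (n : Int) (out : List Int) : Decidable (Spec_poly_mul_trunc a b n out) := by unfold Spec_poly_mul_trunc; infer_instance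

-- ===== CLAIM (what is proved, stated in full; the proofs are below) =====
def Claim_equal_poly_mul_trunc : Prop := ∀ (a : List Int) (b : List Int) (n : Int), Dom_poly_mul_trunc a b n → Spec_poly_mul_trunc a b n (poly_mul_trunc a b n)

-- ===== LEMMAS AND PROOFS =====

-- the common functional spec: coefficient k of the truncated product, with getD-0 extension
def pvConv (a b : List Int) (k : Nat) : Int :=
  ∑ i ∈ Finset.range (k + 1), a.getD i 0 * b.getD (k - i) 0

theorem pv_sum_bridge (n : Nat) (f : Nat → Int) :
    ((List.range n).map f).sum = ∑ i ∈ Finset.range n, f i := rfl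

theorem pv_getD_set (r : List Int) (p k : Nat) (v : Int) (hp : p < r.length) :
    (r.set p v).getD k 0 = if k = p then v else r.getD k 0 := by
  rw [List.getD_eq_getElem?_getD, List.getElem?_set, List.getD_eq_getElem?_getD]
  by_cases h : p = k
  · subst h; simp [hp]
  · simp [h, Ne.symm h]

theorem pv_foldl_congr {α β : Type} (l : List β) (f g : α → β → α) (init : α)
    (h : ∀ acc x, x ∈ l → f acc x = g acc x) : l.foldl f init = l.foldl g init := by
  induction l generalizing init with
  | nil => rfl
  | cons x t ih =>
      simp only [List.foldl_cons]
      rw [h init x (by simp)]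
      exact ih _ (fun acc y hy => h acc y (by simp [hy]))

-- ===== B side =====

theorem alt_inner_eq (a b : List Int) (k : Nat) :
    (PySem.List.pyRange (max 0 ((k : Int) - PySem.List.len b + 1)) (min ((k : Int) + 1) (PySem.List.len a)) 1).foldl
      (fun s i => s + PySem.List.pyGetD a i 0 * PySem.List.pyGetD b ((k : Int) - i) 0)
      0 = pvConv a b k := by
  rw [PySem.List.foldl_add, zero_add]
  simp only [PySem.List.len_eq]
  set lo : Int := max 0 ((k : Int) - (b.length : Int) + 1) with hlo
  set hi : Int := min ((k : Int) + 1) ((a.length : Int)) with hhi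
  by_cases hle : hi ≤ lo
  · rw [PySem.List.pyRange_one_eq_nil hle]
    simp only [List.map_nil, List.sum_nil]
    symm; apply Finset.sum_eq_zero
    intro i hi'
    simp only [Finset.mem_range] at hi'
    by_cases ha : i < a.length
    · have hb : b.length ≤ k - i := by omega
      rw [List.getD_eq_default _ _ hb, mul_zero]
    · rw [List.getD_eq_default _ _ (by omega), zero_mul]
  · rw [PySem.List.pyRange_one, List.map_map, pv_sum_bridge]
    have hlo0 : (0 : Int) ≤ lo := by omega
    have hhik : hi ≤ (k : Int) + 1 := by omega
    calc ∑ j ∈ Finset.range (hi - lo).toNat,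
          (PySem.List.pyGetD a (lo + (j : Int)) 0 * PySem.List.pyGetD b ((k : Int) - (lo + (j : Int))) 0)
        = ∑ j ∈ Finset.range (hi.toNat - lo.toNat),
          (fun i => a.getD i 0 * b.getD (k - i) 0) (lo.toNat + j) := by
          apply Finset.sum_congr (by congr 1; omega)
          intro j hj
          simp only [Finset.mem_range] at hj
          have h1 : lo + (j : Int) = ((lo.toNat + j : Nat) : Int) := by omega
          have h2 : (k : Int) - ((lo.toNat + j : Nat) : Int) = ((k - (lo.toNat + j) : Nat) : Int) := by omega
          rw [h1, h2, PySem.List.pyGetD_natCast, PySem.List.pyGetD_natCast]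
      _ = ∑ i ∈ Finset.Ico lo.toNat hi.toNat, a.getD i 0 * b.getD (k - i) 0 :=
          (Finset.sum_Ico_eq_sum_range (f := fun i => a.getD i 0 * b.getD (k - i) 0)
            (m := lo.toNat) (n := hi.toNat)).symm
      _ = pvConv a b k := by
          unfold pvConv
          apply Finset.sum_subset
          · intro x hx
            simp only [Finset.mem_Ico] at hx
            simp only [Finset.mem_range]
            omega
          · intro i hiR hiI
            simp only [Finset.mem_range] at hiR
            simp only [Finset.mem_Ico, not_and, not_lt] at hiI
            by_cases hilo : i < lo.toNat
            · have hb : b.length ≤ k - i := by omega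
              rw [List.getD_eq_default _ _ hb, mul_zero]
            · have : hi.toNat ≤ i := by omega
              rw [List.getD_eq_default _ _ (show a.length ≤ i by omega), zero_mul]

theorem alt_eq_map (a b : List Int) (n : Int) :
    poly_mul_trunc_alt a b n = (List.range (n + 1).toNat).map (fun k => pvConv a b k) := by
  unfold poly_mul_trunc_alt
  rw [PySem.List.pyRange_one]
  simp only [zero_add, Int.sub_zero, List.map_map]
  apply List.map_congr_left
  intro k _
  exact alt_inner_eq a b k

-- ===== A side =====

-- the contribution of outer-loop index i to cell k, as A's inner loop realises it
def pvContrib (a b : List Int) (n : Int) (i k : Nat) : Int :=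
  if i ≤ k ∧ k - i < (min ((b.length : Int)) (n + 1 - (i : Int))).toNat
  then a.getD i 0 * b.getD (k - i) 0 else 0

-- A's port rewritten as a Nat-indexed fold
theorem a_eq_nat (a b : List Int) (n : Int) :
    poly_mul_trunc a b n =
    (List.range (min ((a.length : Int)) (n + 1)).toNat).foldl
      (fun r i =>
        if a.getD i 0 == 0 then r
        else
          (List.range (min ((b.length : Int)) (n + 1 - (i : Int))).toNat).foldl
            (fun r j => r.set (i + j) (r.getD (i + j) 0 + a.getD i 0 * b.getD j 0)) r)
      (List.replicate (n + 1).toNat 0) := by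
  unfold poly_mul_trunc
  rw [PySem.List.pyRange_one]
  simp only [zero_add, Int.sub_zero, List.foldl_map, PySem.List.len_eq]
  apply pv_foldl_congr
  intro r i _
  simp only [PySem.List.pyGetD_natCast]
  split_ifs
  · rfl
  · rw [PySem.List.pyRange_one]
    simp only [zero_add, Int.sub_zero, List.foldl_map]
    apply pv_foldl_congr
    intro r' j _
    have hc : (i : Int) + (j : Int) = ((i + j : Nat) : Int) := by omega
    simp only [hc, PySem.List.pySetD_natCast, PySem.List.pyGetD_natCast]

theorem inner_length (b : List Int) (ai : Int) (i : Nat) (t : Nat) (r : List Int) :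
    ((List.range t).foldl (fun r j =>
      r.set (i + j) (r.getD (i + j) 0 + ai * b.getD j 0)) r).length = r.length := by
  induction t generalizing r with
  | zero => simp
  | succ t ih =>
      rw [List.range_succ, List.foldl_append]
      simp only [List.foldl_cons, List.foldl_nil, List.length_set]
      exact ih r

theorem inner_getD (b : List Int) (ai : Int) (i : Nat) (t : Nat) (r : List Int)
    (hlen : ∀ j < t, i + j < r.length) (k : Nat) :
    ((List.range t).foldl (fun r j =>
      r.set (i + j) (r.getD (i + j) 0 + ai * b.getD j 0)) r).getD k 0
    = r.getD k 0 + (if i ≤ k ∧ k - i < t then ai * b.getD (k - i) 0 else 0) := by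
  induction t generalizing r with
  | zero => simp
  | succ t ih =>
      rw [List.range_succ, List.foldl_append]
      simp only [List.foldl_cons, List.foldl_nil]
      have hlen' : ∀ j < t, i + j < r.length := fun j hj => hlen j (by omega)
      have hs : i + t <
          ((List.range t).foldl (fun r j =>
            r.set (i + j) (r.getD (i + j) 0 + ai * b.getD j 0)) r).length := by
        rw [inner_length]; exact hlen t (by omega)
      rw [pv_getD_set _ _ _ _ hs, ih r hlen']
      by_cases hk : k = i + t
      · subst hk
        rw [if_pos rfl, ih r hlen']
        have : ¬ (i ≤ i + t ∧ i + t - i < t) := by omega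
        rw [if_neg this, if_pos (by omega)]
        simp
      · rw [if_neg hk]
        congr 1
        by_cases h1 : i ≤ k ∧ k - i < t
        · rw [if_pos h1, if_pos (by omega)]
        · rw [if_neg h1, if_neg (by omega)]

theorem outer_length (a b : List Int) (n : Int) (m : Nat) (r : List Int) :
    ((List.range m).foldl
      (fun r i =>
        if a.getD i 0 == 0 then r
        else
          (List.range (min ((b.length : Int)) (n + 1 - (i : Int))).toNat).foldl
            (fun r j => r.set (i + j) (r.getD (i + j) 0 + a.getD i 0 * b.getD j 0)) r) r).length
    = r.length := by
  induction m generalizing r with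
  | zero => simp
  | succ m ih =>
      rw [List.range_succ, List.foldl_append]
      simp only [List.foldl_cons, List.foldl_nil]
      split_ifs
      · exact ih r
      · rw [inner_length]; exact ih r

theorem outer_getD (a b : List Int) (n : Int) (m : Nat)
    (hm : (m : Int) ≤ min ((a.length : Int)) (n + 1))
    (r : List Int) (hr : r.length = (n + 1).toNat) (k : Nat) (hk : k < (n + 1).toNat) :
    ((List.range m).foldl
      (fun r i =>
        if a.getD i 0 == 0 then r
        else
          (List.range (min ((b.length : Int)) (n + 1 - (i : Int))).toNat).foldl
            (fun r j => r.set (i + j) (r.getD (i + j) 0 + a.getD i 0 * b.getD j 0)) r) r).getD k 0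
    = r.getD k 0 + ∑ i ∈ Finset.range m, pvContrib a b n i k := by
  induction m generalizing r with
  | zero => simp
  | succ m ih =>
      rw [List.range_succ, List.foldl_append]
      simp only [List.foldl_cons, List.foldl_nil]
      have hm' : (m : Int) ≤ min ((a.length : Int)) (n + 1) := by push_cast at hm ⊢; omega
      rw [Finset.sum_range_succ]
      split_ifs with h0
      · have hz : a.getD m 0 = 0 := by simpa using h0
        rw [ih hm' r hr]
        have : pvContrib a b n m k = 0 := by
          unfold pvContrib; split_ifs
          · rw [hz, zero_mul]
          · rfl
        rw [this, add_zero]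
      · have hfl : ((List.range m).foldl
            (fun r i =>
              if a.getD i 0 == 0 then r
              else
                (List.range (min ((b.length : Int)) (n + 1 - (i : Int))).toNat).foldl
                  (fun r j => r.set (i + j) (r.getD (i + j) 0 + a.getD i 0 * b.getD j 0)) r) r).length
            = (n + 1).toNat := by rw [outer_length, hr]
        have hlen : ∀ j < (min ((b.length : Int)) (n + 1 - (m : Int))).toNat,
            m + j < ((List.range m).foldl
              (fun r i =>
                if a.getD i 0 == 0 then r
                else
                  (List.range (min ((b.length : Int)) (n + 1 - (i : Int))).toNat).foldl
                    (fun r j => r.set (i + j) (r.getD (i + j) 0 + a.getD i 0 * b.getD j 0)) r) r).length := by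
          intro j hj
          rw [hfl]
          push_cast at hm hj ⊢
          omega
        rw [inner_getD _ _ _ _ _ hlen k, ih hm' r hr, pvContrib]
        ring

-- the contribution sum collapses to the convolution for k in range
theorem contrib_sum (a b : List Int) (n : Int) (k : Nat) (hk : k < (n + 1).toNat) :
    ∑ i ∈ Finset.range (min ((a.length : Int)) (n + 1)).toNat, pvContrib a b n i k
      = pvConv a b k := by
  set N : Nat := (n + 1).toNat with hN
  set M : Nat := (min ((a.length : Int)) (n + 1)).toNat with hM
  have hMN : M ≤ N := by rw [hM, hN]; omega
  have hkN : k + 1 ≤ N := hk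
  -- the common pointwise term
  have step1 : ∀ i ∈ Finset.range M, pvContrib a b n i k
      = (if i < a.length ∧ i ≤ k ∧ k - i < b.length then a.getD i 0 * b.getD (k - i) 0 else 0) := by
    intro i hi
    simp only [Finset.mem_range] at hi
    have hia : i < a.length := by rw [hM] at hi; omega
    unfold pvContrib
    by_cases h1 : i ≤ k ∧ k - i < (min ((b.length : Int)) (n + 1 - (i : Int))).toNat
    · rw [if_pos h1, if_pos ⟨hia, h1.1, by rw [hM] at hi; omega⟩]
    · rw [if_neg h1, if_neg (by rw [hM] at hi; omega)]
  rw [Finset.sum_congr rfl step1]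
  have step2 : ∑ i ∈ Finset.range M,
      (if i < a.length ∧ i ≤ k ∧ k - i < b.length then a.getD i 0 * b.getD (k - i) 0 else 0)
      = ∑ i ∈ Finset.range N,
      (if i < a.length ∧ i ≤ k ∧ k - i < b.length then a.getD i 0 * b.getD (k - i) 0 else 0) := by
    apply Finset.sum_subset (by intro x hx; simp only [Finset.mem_range] at *; omega)
    intro i hiN hiM
    simp only [Finset.mem_range] at hiN hiM
    rw [if_neg]
    rintro ⟨h1, h2, -⟩
    rw [hM] at hiM; rw [hN] at hiN
    omega
  rw [step2]
  have step3 : ∑ i ∈ Finset.range (k + 1),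
      (if i < a.length ∧ i ≤ k ∧ k - i < b.length then a.getD i 0 * b.getD (k - i) 0 else 0)
      = ∑ i ∈ Finset.range N,
      (if i < a.length ∧ i ≤ k ∧ k - i < b.length then a.getD i 0 * b.getD (k - i) 0 else 0) := by
    apply Finset.sum_subset (by intro x hx; simp only [Finset.mem_range] at *; omega)
    intro i hiN hik
    simp only [Finset.mem_range] at hiN hik
    rw [if_neg]; rintro ⟨-, h2, -⟩; omega
  rw [← step3, pvConv]
  apply Finset.sum_congr rfl
  intro i hi
  simp only [Finset.mem_range] at hi
  split_ifs with h
  · rfl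
  · by_cases ha : i < a.length
    · have hb : b.length ≤ k - i := by
        by_contra hb
        exact h ⟨ha, by omega, by omega⟩
      rw [List.getD_eq_default _ _ hb, mul_zero]
    · rw [List.getD_eq_default _ _ (by omega), zero_mul]

theorem a_length (a b : List Int) (n : Int) :
    (poly_mul_trunc a b n).length = (n + 1).toNat := by
  rw [a_eq_nat, outer_length, List.length_replicate]

theorem a_getD (a b : List Int) (n : Int) (k : Nat) (hk : k < (n + 1).toNat) :
    (poly_mul_trunc a b n).getD k 0 = pvConv a b k := by
  rw [a_eq_nat, outer_getD a b n _ (by omega) _ (by simp) k hk]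
  rw [List.getD_eq_getElem?_getD]
  simp only [List.getElem?_replicate]
  rw [if_pos hk]
  simp only [Option.getD_some, zero_add]
  exact contrib_sum a b n k hk

-- ===== VERDICT (by name: the statement is the Claim_ definition above) =====
theorem poly_mul_trunc_spec : Claim_equal_poly_mul_trunc := by
  intro a b n _
  unfold Spec_poly_mul_trunc
  rw [alt_eq_map]
  apply List.ext_getElem
  · simp [a_length]
  · intro k h1 h2
    have hk : k < (n + 1).toNat := by simpa [a_length] using h1
    have := a_getD a b n k hk
    rw [List.getD_eq_getElem _ _ h1] at this
    simp [this]
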